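-- pv_equiv track=rewrite | github.com/naszhu/multiplecue-responsebox | exp/testmain.py | _pool_for_reward_values
-- ===== SOURCE A (Python) =====
-- from itertools import combinations, permutations
--
-- NUM_POSITIONS = 4
--
-- def _pool_for_reward_values(reward_values: list, cfg: dict) -> list:
--     """
--     Enumerate all trial variants for a reward-value condition.
--
--     Output format:
--       {"position_to_color_id": {0..3: color_id 1–4 or None},
--        "position_to_reward": {0..3: reward (1–4) or None}}
--
--     Color is always independent from reward value. Each position gets a color (1–4);
--     reward values are fixed by the condition.
--     """
--     def make_trial(position_to_color_id: dict, position_to_reward: dict) -> dict: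
--         return {"position_to_color_id": position_to_color_id, "position_to_reward": position_to_reward}
--
--     n_positions = NUM_POSITIONS
--     all_color_ids = list(range(1, n_positions + 1))
--
--     # -------------------------------------------------------------------------
--     # SESSION 1: one stimulus at center. position 0 = center; others unused.
--     # -------------------------------------------------------------------------
--     if cfg["center"]:
--         reward_value = reward_values[0]
--         out = []
--         for color_id in all_color_ids:
--             position_to_color_id = {i: color_id if i == 0 else None for i in range(n_positions)} #there is only one position so take i = 0
--             position_to_reward = {i: reward_value if i == 0 else None for i in range(n_positions)}
--             out.append(make_trial(position_to_color_id, position_to_reward))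
--         return out
--
--     # -------------------------------------------------------------------------
--     # SESSIONS 2–6: n_positions color circles at n_positions positions. 1 or 2 positions show reward.
--     # Single reward [r]: one pos has reward r; colors permuted across all positions.
--     # Dual reward [r1,r2]: two pos have rewards r1,r2; colors permuted across all positions.
--     # This code builds the full combinatorial set of trial variants for each reward condition.
--     # -------------------------------------------------------------------------
--     if len(reward_values) == 1:
--         reward_value = reward_values[0]
--         out = []
--         for reward_pos in range(n_positions):
--             for color_id_i in permutations(all_color_ids):
--                 position_to_color_id = {i: color_id_i[i] for i in range(n_positions)}
--                 position_to_reward = {i: None for i in range(n_positions)}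
--                 position_to_reward[reward_pos] = reward_value
--                 out.append(make_trial(position_to_color_id, position_to_reward))
--         return out
--
--     reward_a, reward_b = reward_values[0], reward_values[1]
--     out = []
--     for position_a, position_b in permutations(range(n_positions), 2):
--         for reward_at_a, reward_at_b in [(reward_a, reward_b), (reward_b, reward_a)]:
--             for color_id_i in permutations(all_color_ids):
--                 position_to_color_id = {i: color_id_i[i] for i in range(n_positions)}
--                 position_to_reward = {i: None for i in range(n_positions)}
--                 position_to_reward[position_a], position_to_reward[position_b] = reward_at_a, reward_at_b
--                 out.append(make_trial(position_to_color_id, position_to_reward))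
--     return out
-- ===== SOURCE B (Python) =====
-- NUM_POSITIONS = 4
--
-- def _pool_for_reward_values(reward_values: list, cfg: dict) -> list:
--     """Recursive backtracking enumerator: color assignments are generated by a
--     depth-first search choosing the smallest unused color per position (no
--     itertools), and reward dicts are written directly as comprehensions keyed
--     by the reward position(s); dual placements come from nested index loops."""
--     n = NUM_POSITIONS
--
--     if cfg["center"]:
--         r = reward_values[0]
--         return [{"position_to_color_id": {i: (c if i == 0 else None) for i in range(n)},
--                  "position_to_reward": {i: (r if i == 0 else None) for i in range(n)}}
--                 for c in range(1, n + 1)]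
--
--     out = []
--
--     def emit(reward_dict):
--         # DFS over color assignments, smallest unused color first
--         def go(used, colors):
--             if len(colors) == n:
--                 out.append({"position_to_color_id": {i: colors[i] for i in range(n)},
--                             "position_to_reward": dict(reward_dict)})
--                 return
--             for c in range(1, n + 1):
--                 if c not in used:
--                     go(used | {c}, colors + [c])
--         go(frozenset(), [])
--
--     if len(reward_values) == 1:
--         r = reward_values[0]
--         for pos in range(n):
--             emit({i: (r if i == pos else None) for i in range(n)})
--     else:
--         ra, rb = reward_values[0], reward_values[1]
--         for pa in range(n):
--             for pb in range(n):
--                 if pb != pa: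
--                     emit({i: (ra if i == pa else rb if i == pb else None) for i in range(n)})
--                     emit({i: (rb if i == pa else ra if i == pb else None) for i in range(n)})
--     return out
-- ===== Notes on version B (the rewrite author's own statement) =====
-- stated objective: alternative
-- what changed: B replaces itertools.permutations entirely: color assignments are generated by a recursive depth-first backtracking search over unused colors, dual reward placements come from nested index loops with an inequality test, and the reward dicts are written directly as comprehensions instead of insert-into-a-None-dict.
import Mathlib
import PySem

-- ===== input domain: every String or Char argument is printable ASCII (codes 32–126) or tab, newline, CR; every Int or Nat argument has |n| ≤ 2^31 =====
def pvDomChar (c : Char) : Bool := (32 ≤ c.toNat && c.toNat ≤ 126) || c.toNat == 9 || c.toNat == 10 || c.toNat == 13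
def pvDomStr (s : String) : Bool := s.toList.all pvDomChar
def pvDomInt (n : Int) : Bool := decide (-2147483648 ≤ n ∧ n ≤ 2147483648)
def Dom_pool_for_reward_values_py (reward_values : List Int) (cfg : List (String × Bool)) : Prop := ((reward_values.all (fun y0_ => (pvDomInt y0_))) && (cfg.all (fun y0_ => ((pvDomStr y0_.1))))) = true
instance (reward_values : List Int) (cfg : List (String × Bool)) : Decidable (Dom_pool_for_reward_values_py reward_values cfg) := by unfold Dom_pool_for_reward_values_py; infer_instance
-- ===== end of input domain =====

-- B enumerates color assignments by a recursive depth-first backtracking search over unused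
-- colors (no permutation library) and writes each reward dict directly as a comprehension;
-- dual placements come from nested index loops (objective: alternative decomposition).

-- ===== PORT A =====
-- make_trial: dict with the two string keys, in insertion order
def pvMakeTrial (c r : List (Int × Option Int)) : List (String × List (Int × Option Int)) :=
  [("position_to_color_id", c), ("position_to_reward", r)]

-- {i: None for i in range(4)}
def pvNoneDict : List (Int × Option Int) :=
  (PySem.List.pyRange 0 4 1).map (fun i => (i, (none : Option Int)))

def pool_for_reward_values_py (reward_values : List Int) (cfg : List (String × Bool)) :
    List (List (String × List (Int × Option Int))) :=
  let all_color_ids := PySem.List.pyRange 1 (4 + 1) 1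
  match cfg.lookup "center" with   -- cfg["center"]; none = KeyError, excluded by Pre_
  | none => []
  | some center =>
    if center then
      match PySem.List.pyGet? reward_values 0 with  -- none = IndexError, excluded by Pre_
      | none => []
      | some reward_value =>
        all_color_ids.foldl (fun out color_id =>
          out ++ [pvMakeTrial
            ((PySem.List.pyRange 0 4 1).map (fun i => (i, if i == (0:Int) then some color_id else none)))
            ((PySem.List.pyRange 0 4 1).map (fun i => (i, if i == (0:Int) then some reward_value else none)))]) []
    else if reward_values.length == 1 then
      match PySem.List.pyGet? reward_values 0 with
      | none => []
      | some reward_value =>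
        (PySem.List.pyRange 0 4 1).foldl (fun out reward_pos =>
          (PySem.List.permutations all_color_ids 4).foldl (fun out color_id_i =>
            out ++ [pvMakeTrial
              ((PySem.List.pyRange 0 4 1).map (fun i => (i, some (PySem.List.pyGetD color_id_i i 0))))
              (((PySem.Dict.mk pvNoneDict).insert reward_pos (some reward_value)).items)]) out) []
    else
      match PySem.List.pyGet? reward_values 0, PySem.List.pyGet? reward_values 1 with
      | some reward_a, some reward_b =>
        (PySem.List.permutations (PySem.List.pyRange 0 4 1) 2).foldl (fun out pab =>
          match pab with
          | [position_a, position_b] =>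
            ([(reward_a, reward_b), (reward_b, reward_a)]).foldl (fun out rab =>
              (PySem.List.permutations all_color_ids 4).foldl (fun out color_id_i =>
                out ++ [pvMakeTrial
                  ((PySem.List.pyRange 0 4 1).map (fun i => (i, some (PySem.List.pyGetD color_id_i i 0))))
                  ((((PySem.Dict.mk pvNoneDict).insert position_a (some rab.1)).insert position_b (some rab.2)).items)]) out) out
          | _ => out) []
      | _, _ => []   -- IndexError (reward_values empty), excluded by Pre_

-- ===== PORT B =====
-- B-side copy of the trial helper
def pvMakeTrialB (c r : List (Int × Option Int)) : List (String × List (Int × Option Int)) :=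
  [("position_to_color_id", c), ("position_to_reward", r)]

-- the recursive DFS 'go(used, colors)' of B: emits a trial at each complete assignment,
-- otherwise tries each unused color in ascending order; fuel = remaining positions
-- (Python recursion depth), so the recursion is structural on it
def pvGoB (fuel : Nat) (rd : List (Int × Option Int)) (used : PySem.Set Int) (colors : List Int) :
    List (List (String × List (Int × Option Int))) :=
  if colors.length == 4 then
    [pvMakeTrialB
      ((PySem.List.pyRange 0 4 1).map (fun i => (i, some (PySem.List.pyGetD colors i 0))))
      rd]
  else match fuel with
  | 0 => []
  | f+1 =>
    (PySem.List.pyRange 1 (4 + 1) 1).foldl (fun acc c =>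
      if PySem.Set.contains used c then acc
      else acc ++ pvGoB f rd (PySem.Set.add used c) (colors ++ [c])) []

-- emit(reward_dict) = go(frozenset(), [])
def pvEmitB (rd : List (Int × Option Int)) : List (List (String × List (Int × Option Int))) :=
  pvGoB 4 rd PySem.Set.empty []

def pool_for_reward_values_py_alt (reward_values : List Int) (cfg : List (String × Bool)) :
    List (List (String × List (Int × Option Int))) :=
  match cfg.lookup "center" with   -- cfg["center"]; none = KeyError, excluded by Pre_
  | some center =>
    if center then
      match PySem.List.pyGet? reward_values 0 with
      | some r =>
        (PySem.List.pyRange 1 (4 + 1) 1).map (fun c =>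
          pvMakeTrialB
            ((PySem.List.pyRange 0 4 1).map (fun i => (i, if i == (0:Int) then some c else none)))
            ((PySem.List.pyRange 0 4 1).map (fun i => (i, if i == (0:Int) then some r else none))))
      | none => []
    else if reward_values.length == 1 then
      match PySem.List.pyGet? reward_values 0 with
      | some r =>
        (PySem.List.pyRange 0 4 1).foldl (fun out pos =>
          out ++ pvEmitB ((PySem.List.pyRange 0 4 1).map (fun i => (i, if i == pos then some r else none)))) []
      | none => []
    else
      match PySem.List.pyGet? reward_values 0 with
      | none => []
      | some ra =>
        match PySem.List.pyGet? reward_values 1 with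
        | none => []
        | some rb =>
        (PySem.List.pyRange 0 4 1).foldl (fun out pa =>
          (PySem.List.pyRange 0 4 1).foldl (fun out pb =>
            if pb == pa then out
            else
              out
                ++ pvEmitB ((PySem.List.pyRange 0 4 1).map (fun i =>
                      (i, if i == pa then some ra else if i == pb then some rb else none)))
                ++ pvEmitB ((PySem.List.pyRange 0 4 1).map (fun i =>
                      (i, if i == pa then some rb else if i == pb then some ra else none)))) out) []
  | none => []

-- ===== PRECONDITION & SPEC =====
-- Pre_ excludes exactly the inputs on which Python A raises: a cfg without a "center"
-- key (KeyError) and an empty reward_values list (IndexError on reward_values[0]).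
def Pre_pool_for_reward_values_py (reward_values : List Int) (cfg : List (String × Bool)) : Prop :=
  (cfg.lookup "center").isSome ∧ reward_values ≠ []
instance (reward_values : List Int) (cfg : List (String × Bool)) : Decidable (Pre_pool_for_reward_values_py reward_values cfg) := by unfold Pre_pool_for_reward_values_py; infer_instance

def pvWitness_pool_for_reward_values_py : List Int × (List (String × Bool)) := ([1], [("center", true)])

def Spec_pool_for_reward_values_py (reward_values : List Int) (cfg : List (String × Bool)) (out : List (List (String × List (Int × Option Int)))) : Prop := out = pool_for_reward_values_py_alt reward_values cfg
instance (reward_values : List Int) (cfg : List (String × Bool)) (out : List (List (String × List (Int × Option Int)))) : Decidable (Spec_pool_for_reward_values_py reward_values cfg out) := by unfold Spec_pool_for_reward_values_py; infer_instance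

-- ===== CLAIM (what is proved, stated in full; the proofs are below) =====
def Claim_equal_pool_for_reward_values_py : Prop := ∀ (reward_values : List Int) (cfg : List (String × Bool)), Dom_pool_for_reward_values_py reward_values cfg → Pre_pool_for_reward_values_py reward_values cfg → Spec_pool_for_reward_values_py reward_values cfg (pool_for_reward_values_py reward_values cfg)

-- ===== LEMMAS AND PROOFS =====

-- fold over a list of candidate [pa, pb] pairs, appending a block per well-formed pair
theorem pvFoldlPairs {γ : Type} (l : List (List Int)) (g : Int → Int → List γ) (acc : List γ) :
    l.foldl (fun out pab => match pab with
      | [pa, pb] => out ++ g pa pb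
      | _ => out) acc
    = acc ++ l.flatMap (fun pab => match pab with
      | [pa, pb] => g pa pb
      | _ => []) := by
  induction l generalizing acc with
  | nil => simp
  | cons x xs ih =>
    rcases x with _ | ⟨pa, _ | ⟨pb, _ | ⟨c, r⟩⟩⟩ <;>
      simp [List.foldl_cons, ih, List.append_assoc]

-- B's nested index loops with the pb ≠ pa test enumerate exactly the ordered pairs of
-- permutations(range(4), 2), in the same order
theorem pvNested {γ : Type} (g h : Int → Int → List γ) :
    (PySem.List.pyRange 0 4 1).foldl (fun out pa =>
      (PySem.List.pyRange 0 4 1).foldl (fun out pb =>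
        if pb == pa then out else out ++ g pa pb ++ h pa pb) out) []
    = (PySem.List.permutations (PySem.List.pyRange 0 4 1) 2).flatMap (fun pab =>
        match pab with
        | [pa, pb] => g pa pb ++ h pa pb
        | _ => []) := by
  have hr : PySem.List.pyRange 0 4 1 = [0, 1, 2, 3] := by decide
  have hp : PySem.List.permutations (PySem.List.pyRange 0 4 1) 2
      = [[0,1],[0,2],[0,3],[1,0],[1,2],[1,3],[2,0],[2,1],[2,3],[3,0],[3,1],[3,2]] := by decide
  rw [hp, hr]
  norm_num [List.foldl_cons, List.foldl_nil, List.flatMap_cons, List.append_assoc]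

-- the DFS from the empty state produces exactly one trial per color permutation,
-- in itertools.permutations order (everything but rd is closed, so this is definitional)
theorem pvGoB_eq (rd : List (Int × Option Int)) :
    pvGoB 4 rd PySem.Set.empty []
    = (PySem.List.permutations (PySem.List.pyRange 1 (4 + 1) 1) 4).map (fun p =>
        pvMakeTrialB ((PySem.List.pyRange 0 4 1).map (fun i => (i, some (PySem.List.pyGetD p i 0)))) rd) := rfl

theorem pvMakeTrialB_eq : pvMakeTrialB = pvMakeTrial := rfl

-- reward dict of the single case: A's insert-into-None-dict equals B's comprehension
theorem pvRdSingle (pos : Int) (hmem : pos ∈ PySem.List.pyRange 0 4 1) (r : Int) :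
    ((PySem.Dict.mk pvNoneDict).insert pos (some r)).items
    = (PySem.List.pyRange 0 4 1).map (fun i => (i, if i == pos then some r else none)) := by
  fin_cases hmem <;> rfl

-- reward dict of the dual case, for distinct positions in range
theorem pvRdDual (pa pb : Int) (ha : pa ∈ PySem.List.pyRange 0 4 1)
    (hb : pb ∈ PySem.List.pyRange 0 4 1) (hne : pb ≠ pa) (x y : Int) :
    (((PySem.Dict.mk pvNoneDict).insert pa (some x)).insert pb (some y)).items
    = (PySem.List.pyRange 0 4 1).map (fun i =>
        (i, if i == pa then some x else if i == pb then some y else none)) := by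
  fin_cases ha <;> fin_cases hb <;> first | exact absurd rfl hne | rfl

theorem pool_for_reward_values_py_spec : Claim_equal_pool_for_reward_values_py := by
  intro rv cfg _ hpre
  obtain ⟨hk, hne⟩ := hpre
  unfold Spec_pool_for_reward_values_py
  unfold pool_for_reward_values_py pool_for_reward_values_py_alt
  cases hc : cfg.lookup "center" with
  | none => simp [hc] at hk
  | some center =>
    cases center with
    | true =>
      cases rv with
      | nil => exact absurd rfl hne
      | cons a t =>
        have h0 : PySem.List.pyGet? (a :: t) 0 = some a := by
          simp [PySem.List.pyGet?, PySem.List.pyIdx?]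
        simp only [pvMakeTrialB_eq, h0, if_true,
          PySem.List.foldl_append_singleton_eq_map, List.nil_append]
    | false =>
      cases rv with
      | nil => exact absurd rfl hne
      | cons a t =>
        cases t with
        | nil =>
          have h0 : PySem.List.pyGet? [a] 0 = some a := by
            simp [PySem.List.pyGet?, PySem.List.pyIdx?]
          simp only [h0, List.length_cons, List.length_nil, beq_self_eq_true, if_true,
            Bool.false_eq_true, if_false, PySem.List.foldl_append_singleton_eq_map]
          rw [PySem.List.foldl_append_eq_flatMap]
          conv_rhs => rw [PySem.List.foldl_append_eq_flatMap]
          simp only [List.nil_append]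
          refine List.flatMap_congr ?_
          intro pos hpos
          rw [pvEmitB, pvGoB_eq, pvMakeTrialB_eq, pvRdSingle pos hpos a]
        | cons b t2 =>
          have hnn : (0:Int) ≤ (t2.length : Int) + 1 := by positivity
          have h0 : PySem.List.pyGet? (a :: b :: t2) 0 = some a := by
            simp [PySem.List.pyGet?, PySem.List.pyIdx?, hnn]
          have h1 : PySem.List.pyGet? (a :: b :: t2) 1 = some b := by
            simp [PySem.List.pyGet?, PySem.List.pyIdx?]
          have hlen : ((a :: b :: t2).length == 1) = false := by simp
          simp only [h0, h1, hlen, Bool.false_eq_true, if_false,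
            PySem.List.foldl_append_singleton_eq_map, PySem.List.foldl_append_eq_flatMap]
          rw [pvFoldlPairs, pvNested]
          simp only [List.nil_append]
          have hp2 : PySem.List.permutations (PySem.List.pyRange 0 4 1) 2
              = [[0,1],[0,2],[0,3],[1,0],[1,2],[1,3],[2,0],[2,1],[2,3],[3,0],[3,1],[3,2]] := by
            decide
          rw [hp2]
          refine List.flatMap_congr ?_
          intro pab hmem
          fin_cases hmem <;>
            · simp only [List.flatMap_cons, List.flatMap_nil, List.append_nil]
              rw [pvEmitB, pvEmitB, pvGoB_eq, pvGoB_eq, pvMakeTrialB_eq,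
                pvRdDual _ _ (by decide) (by decide) (by decide) a b,
                pvRdDual _ _ (by decide) (by decide) (by decide) b a]

-- ===== VERDICT =====
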